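-- pv_equiv track=rewrite | github.com/Splavacodo/Algo-DS | General/maxSumCommSub.py | MSCS
-- ===== SOURCE A (Python) =====
-- def MSCS(A, B):
--     # Create an empty 2d array
--     f = [[0 for _ in range(len(B) + 1)] for _ in range(len(A) + 1)]
--
--     for i in range(1, len(A) + 1):
--         for j in range(1, len(B) + 1):
--             if A[i - 1] == B[j - 1]:
--                 if A[i - 1] > 0:
--                     f[i][j] = f[i - 1][j - 1] + A[i - 1]
--                 else:
--                     f[i][j] = f[i - 1][j - 1]
--             else:
--                 f[i][j] = max(f[i - 1][j], f[i][j - 1])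
--
--     return f[len(A)][len(B)]
-- ===== SOURCE B (Python) =====
-- def MSCS(A, B):
--     # Demand-driven top-down evaluation of the recurrence: an explicit stack of
--     # (i, j, ready) frames plus a memo dict replace A's bottom-up 2D table fill.
--     memo = {}
--     stack = [(len(A), len(B), False)]
--     while stack:
--         i, j, ready = stack.pop()
--         if (i, j) in memo:
--             continue
--         if i == 0 or j == 0:
--             memo[(i, j)] = 0
--         elif ready:
--             if A[i - 1] == B[j - 1]:
--                 memo[(i, j)] = memo[(i - 1, j - 1)] + (A[i - 1] if A[i - 1] > 0 else 0)
--             else: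
--                 memo[(i, j)] = max(memo[(i - 1, j)], memo[(i, j - 1)])
--         else:
--             stack.append((i, j, True))
--             if A[i - 1] == B[j - 1]:
--                 stack.append((i - 1, j - 1, False))
--             else:
--                 stack.append((i - 1, j, False))
--                 stack.append((i, j - 1, False))
--     return memo[(len(A), len(B))]
-- ===== Notes on version B (the rewrite author's own statement) =====
-- stated objective: alternative
-- what changed: Replaced A's bottom-up fill of a full (len(A)+1)x(len(B)+1) table with nested index loops by a demand-driven top-down evaluation: an explicit stack of (i,j,ready) frames and a memo dict compute only the states the recurrence actually demands, in dependency order.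
import Mathlib
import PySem

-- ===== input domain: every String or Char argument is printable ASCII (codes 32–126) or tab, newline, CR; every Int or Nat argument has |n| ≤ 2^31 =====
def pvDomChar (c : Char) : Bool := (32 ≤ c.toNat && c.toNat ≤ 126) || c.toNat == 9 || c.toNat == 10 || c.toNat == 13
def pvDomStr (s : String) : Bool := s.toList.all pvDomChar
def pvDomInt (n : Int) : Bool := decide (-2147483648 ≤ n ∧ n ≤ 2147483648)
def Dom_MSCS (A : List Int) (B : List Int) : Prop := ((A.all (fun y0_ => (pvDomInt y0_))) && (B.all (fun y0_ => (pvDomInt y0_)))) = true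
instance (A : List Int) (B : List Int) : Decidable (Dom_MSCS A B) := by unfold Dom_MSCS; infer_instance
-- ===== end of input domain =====

-- B replaces A's bottom-up fill of the full (len A+1)×(len B+1) table by a demand-driven
-- top-down evaluation: an explicit stack of (i, j, ready) frames plus a memo dict.

-- ===== PORT A =====
-- literal port of Source A: build the zero matrix, fill it with the two nested index loops, read the corner.
-- All pyGetD/pySetD accesses happen at indices the Python loops keep in range, so the defaults are never used (exact).
def MSCS (A : List Int) (B : List Int) : Int :=
  let f0 : List (List Int) :=
    (PySem.List.pyRange 0 ((A.length : Int) + 1) 1).map (fun _ =>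
      (PySem.List.pyRange 0 ((B.length : Int) + 1) 1).map (fun _ => (0 : Int)))
  let f :=
    (PySem.List.pyRange 1 ((A.length : Int) + 1) 1).foldl (fun f i =>
      (PySem.List.pyRange 1 ((B.length : Int) + 1) 1).foldl (fun f j =>
        let v : Int :=
          if PySem.List.pyGetD A (i - 1) 0 = PySem.List.pyGetD B (j - 1) 0 then
            if PySem.List.pyGetD A (i - 1) 0 > 0 then
              PySem.List.pyGetD (PySem.List.pyGetD f (i - 1) []) (j - 1) 0 + PySem.List.pyGetD A (i - 1) 0
            else
              PySem.List.pyGetD (PySem.List.pyGetD f (i - 1) []) (j - 1) 0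
          else
            max (PySem.List.pyGetD (PySem.List.pyGetD f (i - 1) []) j 0)
                (PySem.List.pyGetD (PySem.List.pyGetD f i []) (j - 1) 0)
        PySem.List.pySetD f i (PySem.List.pySetD (PySem.List.pyGetD f i []) j v)) f) f0
  PySem.List.pyGetD (PySem.List.pyGetD f (A.length : Int) []) (B.length : Int) 0

-- ===== PORT B =====
-- potential of Source B's stack: a while-loop iteration strictly decreases it (termination measure).
def phiB : List (Nat × Nat × Bool) → Nat
  | [] => 0
  | (i, j, r) :: s => (if r then 1 else 2 * 3 ^ (i + j)) + phiB s

-- literal port of Source B's while loop over (stack, memo); the indices i, j are the nonnegative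
-- ints len(A)…0 / len(B)…0, carried as Nat. memo[...] reads are pyGetD-style getD with
-- default 0; Source B's reads never miss (proved below via the stack invariant), so this is exact.
def loopB (A B : List Int) : List (Nat × Nat × Bool) → PySem.Dict (Nat × Nat) Int → PySem.Dict (Nat × Nat) Int
  | [], memo => memo
  | (i, j, ready) :: stack, memo =>
    if memo.contains (i, j) then loopB A B stack memo
    else if i = 0 ∨ j = 0 then loopB A B stack (memo.insert (i, j) 0)
    else if ready then
      if PySem.List.pyGetD A ((i : Int) - 1) 0 = PySem.List.pyGetD B ((j : Int) - 1) 0 then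
        loopB A B stack (memo.insert (i, j)
          (memo.getD (i - 1, j - 1) 0 +
            (if PySem.List.pyGetD A ((i : Int) - 1) 0 > 0 then PySem.List.pyGetD A ((i : Int) - 1) 0 else 0)))
      else
        loopB A B stack (memo.insert (i, j) (max (memo.getD (i - 1, j) 0) (memo.getD (i, j - 1) 0)))
    else
      if PySem.List.pyGetD A ((i : Int) - 1) 0 = PySem.List.pyGetD B ((j : Int) - 1) 0 then
        loopB A B ((i - 1, j - 1, false) :: (i, j, true) :: stack) memo
      else
        loopB A B ((i, j - 1, false) :: (i - 1, j, false) :: (i, j, true) :: stack) memo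
  termination_by s _ => phiB s
  decreasing_by
  · have h : 0 < (if ready then 1 else 2 * 3 ^ (i + j)) := by
      cases ready
      · simp only [Bool.false_eq_true, if_false]; positivity
      · simp
    simp only [phiB]; omega
  · have h : 0 < (if ready then 1 else 2 * 3 ^ (i + j)) := by
      cases ready
      · simp only [Bool.false_eq_true, if_false]; positivity
      · simp
    simp only [phiB]; omega
  · have h : 0 < (if ready then 1 else 2 * 3 ^ (i + j)) := by
      cases ready
      · simp only [Bool.false_eq_true, if_false]; positivity
      · simp
    simp only [phiB]; omega
  · have h : 0 < (if ready then 1 else 2 * 3 ^ (i + j)) := by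
      cases ready
      · simp only [Bool.false_eq_true, if_false]; positivity
      · simp
    simp only [phiB]; omega
  · -- expand, match
    rename_i hmem hij hr hcond
    have hb : ready = false := by revert hr; cases ready <;> simp
    subst hb
    obtain ⟨p, rfl⟩ : ∃ p, i = p + 1 := ⟨i - 1, by omega⟩
    obtain ⟨q, rfl⟩ : ∃ q, j = q + 1 := ⟨j - 1, by omega⟩
    simp only [phiB, Nat.add_sub_cancel, Bool.false_eq_true, if_false, if_true]
    have e : (3 : ℕ) ^ (p + 1 + (q + 1)) = 9 * 3 ^ (p + q) := by
      rw [show p + 1 + (q + 1) = (p + q) + 2 by omega, pow_add]; ring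
    have h1 : 1 ≤ (3 : ℕ) ^ (p + q) := Nat.one_le_pow _ _ (by norm_num)
    rw [e]; linarith
  · -- expand, no match
    rename_i hmem hij hr hcond
    have hb : ready = false := by revert hr; cases ready <;> simp
    subst hb
    obtain ⟨p, rfl⟩ : ∃ p, i = p + 1 := ⟨i - 1, by omega⟩
    obtain ⟨q, rfl⟩ : ∃ q, j = q + 1 := ⟨j - 1, by omega⟩
    simp only [phiB, Nat.add_sub_cancel, Bool.false_eq_true, if_false, if_true]
    have e : (3 : ℕ) ^ (p + 1 + (q + 1)) = 9 * 3 ^ (p + q) := by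
      rw [show p + 1 + (q + 1) = (p + q) + 2 by omega, pow_add]; ring
    have e1 : (3 : ℕ) ^ (p + 1 + q) = 3 * 3 ^ (p + q) := by
      rw [show p + 1 + q = (p + q) + 1 by omega, pow_succ]; ring
    have e2 : (3 : ℕ) ^ (p + (q + 1)) = 3 * 3 ^ (p + q) := by
      rw [show p + (q + 1) = (p + q) + 1 by omega, pow_succ]; ring
    have h1 : 1 ≤ (3 : ℕ) ^ (p + q) := Nat.one_le_pow _ _ (by norm_num)
    rw [e, e1, e2]; linarith

-- literal port of Source B: seed the stack with (len A, len B, False), run the loop, read memo[(len A, len B)].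
def MSCS_alt (A : List Int) (B : List Int) : Int :=
  (loopB A B [(A.length, B.length, false)] PySem.Dict.empty).getD (A.length, B.length) 0

-- ===== PRECONDITION & SPEC =====
def Spec_MSCS (A : List Int) (B : List Int) (out : Int) : Prop := out = MSCS_alt A B
instance (A : List Int) (B : List Int) (out : Int) : Decidable (Spec_MSCS A B out) := by unfold Spec_MSCS; infer_instance

-- ===== CLAIM (what is proved, stated in full; the proofs are below) =====
def Claim_equal_MSCS : Prop := ∀ (A : List Int) (B : List Int), Dom_MSCS A B → Spec_MSCS A B (MSCS A B)

-- ===== LEMMAS AND PROOFS =====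
-- gRec is the DP recurrence both programs compute; the A side is proved equal to it via a
-- characterization of the partially filled matrix (matN/matP), the B side via invariants of
-- the stack/memo loop (GoodB: every memoized value is a gRec value; InvB: every ready frame's
-- dependencies are memoized or scheduled above it).

def gRec (A B : List Int) : Nat → Nat → Int
  | 0, _ => 0
  | _ + 1, 0 => 0
  | i + 1, j + 1 =>
    if A.getD i 0 = B.getD j 0 then
      gRec A B i j + (if A.getD i 0 > 0 then A.getD i 0 else 0)
    else
      max (gRec A B i (j + 1)) (gRec A B (i + 1) j)
termination_by i j => (i, j)

theorem gRec_zero_left (A B : List Int) (c : Nat) : gRec A B 0 c = 0 := by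
  cases c <;> simp [gRec]

theorem gRec_zero_right (A B : List Int) (k : Nat) : gRec A B k 0 = 0 := by
  cases k <;> simp [gRec]

theorem gRec_succ (A B : List Int) (i j : Nat) :
    gRec A B (i + 1) (j + 1) =
      if A.getD i 0 = B.getD j 0 then
        gRec A B i j + (if A.getD i 0 > 0 then A.getD i 0 else 0)
      else
        max (gRec A B i (j + 1)) (gRec A B (i + 1) j) := by
  simp [gRec]

-- ===== B-side proof =====

def depsB (A B : List Int) (i j : Nat) : List (Nat × Nat) :=
  if PySem.List.pyGetD A ((i : Int) - 1) 0 = PySem.List.pyGetD B ((j : Int) - 1) 0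
  then [(i - 1, j - 1)] else [(i - 1, j), (i, j - 1)]

def GoodB (A B : List Int) (memo : PySem.Dict (Nat × Nat) Int) : Prop :=
  ∀ i j v, memo.get? (i, j) = some v → v = gRec A B i j

def InvB (A B : List Int) (memo : PySem.Dict (Nat × Nat) Int) :
    List (Nat × Nat) → List (Nat × Nat × Bool) → Prop
  | _, [] => True
  | abv, (i, j, r) :: rest =>
      (r = true → ∀ d ∈ depsB A B i j, memo.contains d = true ∨ d ∈ abv) ∧
      InvB A B memo ((i, j) :: abv) rest

theorem InvB_mono (A B : List Int) (memo memo' : PySem.Dict (Nat × Nat) Int)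
    (hm : ∀ d, memo.contains d = true → memo'.contains d = true) :
    ∀ (s : List (Nat × Nat × Bool)) (abv abv' : List (Nat × Nat)),
      (∀ d ∈ abv, d ∈ abv') → InvB A B memo abv s → InvB A B memo' abv' s := by
  intro s
  induction s with
  | nil => intro abv abv' _ _; trivial
  | cons f rest ih =>
    obtain ⟨i, j, r⟩ := f
    intro abv abv' ha hinv
    obtain ⟨h1, h2⟩ := hinv
    refine ⟨fun hr d hd => ?_, ih _ _ (fun d hd => ?_) h2⟩
    · rcases h1 hr d hd with h | h
      · exact Or.inl (hm d h)
      · exact Or.inr (ha d h)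
    · simp only [List.mem_cons] at hd ⊢
      rcases hd with h | h
      · exact Or.inl h
      · exact Or.inr (ha d h)

-- popping a frame whose coordinates are (now) memoized preserves the invariant of the rest
theorem InvB_shift (A B : List Int) (memo memo' : PySem.Dict (Nat × Nat) Int)
    (c : Nat × Nat)
    (hm : ∀ d, memo.contains d = true → memo'.contains d = true)
    (hc : memo'.contains c = true) :
    ∀ (s : List (Nat × Nat × Bool)) (abv : List (Nat × Nat)),
      InvB A B memo (c :: abv) s → InvB A B memo' abv s := by
  intro s
  induction s with
  | nil => intro abv _; trivial
  | cons f rest ih =>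
    obtain ⟨i, j, r⟩ := f
    intro abv hinv
    obtain ⟨h1, h2⟩ := hinv
    refine ⟨fun hr d hd => ?_, ?_⟩
    · rcases h1 hr d hd with h | h
      · exact Or.inl (hm d h)
      · simp only [List.mem_cons] at h
        rcases h with rfl | h
        · exact Or.inl hc
        · exact Or.inr h
    · apply ih
      exact InvB_mono A B memo memo (fun d h => h) rest _ _
        (fun d hd => by simp only [List.mem_cons] at hd ⊢; tauto) h2

theorem insert_keeps_get? (memo : PySem.Dict (Nat × Nat) Int) (p k : Nat × Nat)
    (w v : Int) (hc : ¬ memo.contains p = true) (h : memo.get? k = some v) :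
    (memo.insert p w).get? k = some v := by
  rw [PySem.Dict.get?_insert]
  split_ifs with he
  · exfalso
    apply hc
    rw [PySem.Dict.contains_eq_isSome_get?, ← he, h]
    rfl
  · exact h

theorem loopB_monotone (A B : List Int) :
    ∀ (s : List (Nat × Nat × Bool)) (memo : PySem.Dict (Nat × Nat) Int)
      (k : Nat × Nat) (v : Int),
      memo.get? k = some v → (loopB A B s memo).get? k = some v := by
  intro s memo
  induction s, memo using loopB.induct A B with
  | case1 memo => intro k v h; simpa [loopB] using h
  | case2 i j ready stack memo hc ih =>
    intro k v h
    rw [loopB, if_pos hc]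
    exact ih k v h
  | case3 i j ready stack memo hc hz ih =>
    intro k v h
    rw [loopB, if_neg hc, if_pos hz]
    exact ih k v (insert_keeps_get? memo _ k _ v hc h)
  | case4 i j stack memo hc hz hm ih =>
    intro k v h
    rw [loopB, if_neg hc, if_neg hz, if_pos (show (true = true) from rfl), if_pos hm]
    exact ih k v (insert_keeps_get? memo _ k _ v hc h)
  | case5 i j stack memo hc hz hm ih =>
    intro k v h
    rw [loopB, if_neg hc, if_neg hz, if_pos (show (true = true) from rfl), if_neg hm]
    exact ih k v (insert_keeps_get? memo _ k _ v hc h)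
  | case6 i j ready stack memo hc hz hr hm ih =>
    intro k v h
    rw [loopB, if_neg hc, if_neg hz, if_neg hr, if_pos hm]
    exact ih k v h
  | case7 i j ready stack memo hc hz hr hm ih =>
    intro k v h
    rw [loopB, if_neg hc, if_neg hz, if_neg hr, if_neg hm]
    exact ih k v h

theorem loopB_contains_mono (A B : List Int) (s : List (Nat × Nat × Bool))
    (memo : PySem.Dict (Nat × Nat) Int) (k : Nat × Nat)
    (h : memo.contains k = true) : (loopB A B s memo).contains k = true := by
  rw [PySem.Dict.contains_eq_isSome_get?] at h
  obtain ⟨v, hv⟩ := Option.isSome_iff_exists.mp h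
  rw [PySem.Dict.contains_eq_isSome_get?, loopB_monotone A B s memo k v hv]
  rfl

theorem contains_insert_self' (memo : PySem.Dict (Nat × Nat) Int) (k : Nat × Nat)
    (v : Int) : (memo.insert k v).contains k = true :=
  PySem.Dict.contains_insert_self memo k v

theorem contains_insert_mono' (memo : PySem.Dict (Nat × Nat) Int) (k d : Nat × Nat)
    (v : Int) (h : memo.contains d = true) : (memo.insert k v).contains d = true := by
  rw [PySem.Dict.contains_insert, h]
  simp

theorem loopB_reach (A B : List Int) :
    ∀ (s : List (Nat × Nat × Bool)) (memo : PySem.Dict (Nat × Nat) Int)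
      (i' j' : Nat) (r' : Bool), (i', j', r') ∈ s →
      (loopB A B s memo).contains (i', j') = true := by
  intro s memo
  induction s, memo using loopB.induct A B with
  | case1 memo => intro i' j' r' h; simp at h
  | case2 i j ready stack memo hc ih =>
    intro i' j' r' h
    rw [loopB, if_pos hc]
    rcases List.mem_cons.mp h with he | hmem
    · cases he
      exact loopB_contains_mono A B stack memo _ hc
    · exact ih i' j' r' hmem
  | case3 i j ready stack memo hc hz ih =>
    intro i' j' r' h
    rw [loopB, if_neg hc, if_pos hz]
    rcases List.mem_cons.mp h with he | hmem
    · cases he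
      exact loopB_contains_mono A B stack _ _ (contains_insert_self' memo _ _)
    · exact ih i' j' r' hmem
  | case4 i j stack memo hc hz hm ih =>
    intro i' j' r' h
    rw [loopB, if_neg hc, if_neg hz, if_pos (show (true = true) from rfl), if_pos hm]
    rcases List.mem_cons.mp h with he | hmem
    · cases he
      exact loopB_contains_mono A B stack _ _ (contains_insert_self' memo _ _)
    · exact ih i' j' r' hmem
  | case5 i j stack memo hc hz hm ih =>
    intro i' j' r' h
    rw [loopB, if_neg hc, if_neg hz, if_pos (show (true = true) from rfl), if_neg hm]
    rcases List.mem_cons.mp h with he | hmem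
    · cases he
      exact loopB_contains_mono A B stack _ _ (contains_insert_self' memo _ _)
    · exact ih i' j' r' hmem
  | case6 i j ready stack memo hc hz hr hm ih =>
    intro i' j' r' h
    rw [loopB, if_neg hc, if_neg hz, if_neg hr, if_pos hm]
    rcases List.mem_cons.mp h with he | hmem
    · have h1 : i' = i := congrArg (fun t => t.1) he
      have h2 : j' = j := congrArg (fun t => t.2.1) he
      rw [h1, h2]
      exact ih i j true (by simp)
    · exact ih i' j' r' (by simp [hmem])
  | case7 i j ready stack memo hc hz hr hm ih =>
    intro i' j' r' h
    rw [loopB, if_neg hc, if_neg hz, if_neg hr, if_neg hm]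
    rcases List.mem_cons.mp h with he | hmem
    · have h1 : i' = i := congrArg (fun t => t.1) he
      have h2 : j' = j := congrArg (fun t => t.2.1) he
      rw [h1, h2]
      exact ih i j true (by simp)
    · exact ih i' j' r' (by simp [hmem])

theorem GoodB_insert (A B : List Int) (memo : PySem.Dict (Nat × Nat) Int)
    (i j : Nat) (v : Int) (hg : GoodB A B memo) (hv : v = gRec A B i j) :
    GoodB A B (memo.insert (i, j) v) := by
  intro i' j' w h
  rw [PySem.Dict.get?_insert] at h
  split_ifs at h with he
  · cases h
    obtain ⟨rfl, rfl⟩ := Prod.mk.injEq .. ▸ he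
    exact hv
  · exact hg i' j' w h

theorem getD_of_contains_good (A B : List Int) (memo : PySem.Dict (Nat × Nat) Int)
    (i j : Nat) (hg : GoodB A B memo) (hc : memo.contains (i, j) = true) :
    memo.getD (i, j) 0 = gRec A B i j := by
  rw [PySem.Dict.contains_eq_isSome_get?] at hc
  obtain ⟨v, hv⟩ := Option.isSome_iff_exists.mp hc
  rw [PySem.Dict.getD_eq_get?_getD, hv]
  exact hg i j v hv

theorem loopB_good (A B : List Int) :
    ∀ (s : List (Nat × Nat × Bool)) (memo : PySem.Dict (Nat × Nat) Int),
      GoodB A B memo → InvB A B memo [] s → GoodB A B (loopB A B s memo) := by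
  intro s memo
  induction s, memo using loopB.induct A B with
  | case1 memo => intro hg _; simpa [loopB] using hg
  | case2 i j ready stack memo hc ih =>
    intro hg hinv
    rw [loopB, if_pos hc]
    exact ih hg (InvB_shift A B memo memo (i, j) (fun d h => h) hc stack [] hinv.2)
  | case3 i j ready stack memo hc hz ih =>
    intro hg hinv
    rw [loopB, if_neg hc, if_pos hz]
    have hv : (0 : Int) = gRec A B i j := by
      rcases hz with rfl | rfl
      · exact (gRec_zero_left A B j).symm
      · exact (gRec_zero_right A B i).symm
    exact ih (GoodB_insert A B memo i j 0 hg hv)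
      (InvB_shift A B memo _ (i, j) (fun d h => contains_insert_mono' memo _ d _ h)
        (contains_insert_self' memo _ _) stack [] hinv.2)
  | case4 i j stack memo hc hz hm ih =>
    intro hg hinv
    rw [loopB, if_neg hc, if_neg hz, if_pos (show (true = true) from rfl), if_pos hm]
    obtain ⟨p, rfl⟩ : ∃ p, i = p + 1 := ⟨i - 1, by omega⟩
    obtain ⟨q, rfl⟩ : ∃ q, j = q + 1 := ⟨j - 1, by omega⟩
    have hdep : memo.contains (p + 1 - 1, q + 1 - 1) = true := by
      rcases hinv.1 rfl (p + 1 - 1, q + 1 - 1)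
        (by rw [depsB, if_pos hm]; simp) with h | h
      · exact h
      · simp at h
    have hA : PySem.List.pyGetD A (((p + 1 : Nat) : Int) - 1) 0 = A.getD p 0 := by
      rw [show (((p + 1 : Nat) : Int) - 1) = ((p : Nat) : Int) by push_cast; ring,
          PySem.List.pyGetD_natCast]
    have hB : PySem.List.pyGetD B (((q + 1 : Nat) : Int) - 1) 0 = B.getD q 0 := by
      rw [show (((q + 1 : Nat) : Int) - 1) = ((q : Nat) : Int) by push_cast; ring,
          PySem.List.pyGetD_natCast]
    have hval : memo.getD (p + 1 - 1, q + 1 - 1) 0 +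
        (if PySem.List.pyGetD A (((p + 1 : Nat) : Int) - 1) 0 > 0
         then PySem.List.pyGetD A (((p + 1 : Nat) : Int) - 1) 0 else 0)
        = gRec A B (p + 1) (q + 1) := by
      simp only [Nat.add_sub_cancel] at hdep ⊢
      rw [getD_of_contains_good A B memo p q hg hdep, gRec_succ, hA]
      rw [hA, hB] at hm
      rw [if_pos hm]
    exact ih (GoodB_insert A B memo _ _ _ hg hval)
      (InvB_shift A B memo _ (p + 1, q + 1) (fun d h => contains_insert_mono' memo _ d _ h)
        (contains_insert_self' memo _ _) stack [] hinv.2)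
  | case5 i j stack memo hc hz hm ih =>
    intro hg hinv
    rw [loopB, if_neg hc, if_neg hz, if_pos (show (true = true) from rfl), if_neg hm]
    obtain ⟨p, rfl⟩ : ∃ p, i = p + 1 := ⟨i - 1, by omega⟩
    obtain ⟨q, rfl⟩ : ∃ q, j = q + 1 := ⟨j - 1, by omega⟩
    have hdep1 : memo.contains (p + 1 - 1, q + 1) = true := by
      rcases hinv.1 rfl (p + 1 - 1, q + 1)
        (by rw [depsB, if_neg hm]; simp) with h | h
      · exact h
      · simp at h
    have hdep2 : memo.contains (p + 1, q + 1 - 1) = true := by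
      rcases hinv.1 rfl (p + 1, q + 1 - 1)
        (by rw [depsB, if_neg hm]; simp) with h | h
      · exact h
      · simp at h
    have hA : PySem.List.pyGetD A (((p + 1 : Nat) : Int) - 1) 0 = A.getD p 0 := by
      rw [show (((p + 1 : Nat) : Int) - 1) = ((p : Nat) : Int) by push_cast; ring,
          PySem.List.pyGetD_natCast]
    have hB : PySem.List.pyGetD B (((q + 1 : Nat) : Int) - 1) 0 = B.getD q 0 := by
      rw [show (((q + 1 : Nat) : Int) - 1) = ((q : Nat) : Int) by push_cast; ring,
          PySem.List.pyGetD_natCast]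
    have hval : max (memo.getD (p + 1 - 1, q + 1) 0) (memo.getD (p + 1, q + 1 - 1) 0)
        = gRec A B (p + 1) (q + 1) := by
      simp only [Nat.add_sub_cancel] at hdep1 hdep2 ⊢
      rw [getD_of_contains_good A B memo p (q + 1) hg hdep1,
          getD_of_contains_good A B memo (p + 1) q hg hdep2, gRec_succ]
      rw [hA, hB] at hm
      rw [if_neg hm]
    exact ih (GoodB_insert A B memo _ _ _ hg hval)
      (InvB_shift A B memo _ (p + 1, q + 1) (fun d h => contains_insert_mono' memo _ d _ h)
        (contains_insert_self' memo _ _) stack [] hinv.2)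
  | case6 i j ready stack memo hc hz hr hm ih =>
    intro hg hinv
    rw [loopB, if_neg hc, if_neg hz, if_neg hr, if_pos hm]
    refine ih hg ⟨fun h => (by simp at h), ?_, ?_⟩
    · intro h d hd
      rw [depsB, if_pos hm] at hd
      simp at hd
      exact Or.inr (by simp [hd])
    · exact InvB_mono A B memo memo (fun d h => h) stack _ _
        (fun d hd => by simp only [List.mem_cons] at hd ⊢; tauto) hinv.2
  | case7 i j ready stack memo hc hz hr hm ih =>
    intro hg hinv
    rw [loopB, if_neg hc, if_neg hz, if_neg hr, if_neg hm]
    refine ih hg ⟨fun h => (by simp at h), ⟨fun h => (by simp at h), ?_, ?_⟩⟩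
    · intro h d hd
      rw [depsB, if_neg hm] at hd
      simp only [List.mem_cons] at hd
      rcases hd with rfl | hd
      · exact Or.inr (by simp)
      · simp at hd
        exact Or.inr (by simp [hd])
    · exact InvB_mono A B memo memo (fun d h => h) stack _ _
        (fun d hd => by simp only [List.mem_cons] at hd ⊢; tauto) hinv.2

theorem MSCS_alt_eq (A B : List Int) : MSCS_alt A B = gRec A B A.length B.length := by
  have hgood : GoodB A B (loopB A B [(A.length, B.length, false)] PySem.Dict.empty) := by
    apply loopB_good
    · intro i j v h
      rw [PySem.Dict.get?_empty] at h
      cases h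
    · exact ⟨fun h => by simp at h, trivial⟩
  have hreach := loopB_reach A B [(A.length, B.length, false)] PySem.Dict.empty
    A.length B.length false (by simp)
  unfold MSCS_alt
  exact getD_of_contains_good A B _ _ _ hgood hreach

-- ===== A-side proof (matrix characterization) =====

theorem set_map_range {β : Type} (F : Nat → β) (n t : Nat) (v : β) :
    (List.map F (List.range n)).set t v
      = List.map (fun r => if r = t then v else F r) (List.range n) := by
  apply List.ext_getElem (by simp)
  intro i h1 h2
  simp only [List.getElem_set, List.getElem_map, List.getElem_range]
  by_cases h : i = t
  · simp [h]
  · simp [h]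
    intro hh
    exact absurd hh.symm h

def matN (A B : List Int) (k : Nat) : List (List Int) :=
  List.map (fun r => List.map (fun cc => if r ≤ k then gRec A B r cc else 0)
    (List.range (B.length + 1))) (List.range (A.length + 1))

def matP (A B : List Int) (k c : Nat) : List (List Int) :=
  List.map (fun r => List.map (fun cc => if r ≤ k ∨ (r = k + 1 ∧ cc ≤ c) then gRec A B r cc else 0)
    (List.range (B.length + 1))) (List.range (A.length + 1))

theorem matP_zero (A B : List Int) (k : Nat) : matP A B k 0 = matN A B k := by
  apply List.ext_getElem (by simp [matP, matN])
  intro r h1 h2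
  simp only [matP, matN, List.getElem_map, List.getElem_range]
  apply List.ext_getElem (by simp)
  intro cc hh1 hh2
  simp only [List.getElem_map, List.getElem_range]
  by_cases hrk : r ≤ k
  · simp [hrk]
  · simp only [hrk, false_or, if_false]
    split_ifs with h
    · obtain ⟨hre, hc⟩ := h
      have : cc = 0 := by omega
      subst this
      subst hre
      exact gRec_zero_right A B (k + 1)
    · rfl

theorem matP_last (A B : List Int) (k : Nat) : matP A B k B.length = matN A B (k + 1) := by
  apply List.ext_getElem (by simp [matP, matN])
  intro r h1 h2
  simp only [matP, matN, List.getElem_map, List.getElem_range]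
  apply List.ext_getElem (by simp)
  intro cc hh1 hh2
  simp only [List.getElem_map, List.getElem_range]
  have hcc : cc < B.length + 1 := by simpa using hh1
  split_ifs with h h' <;> first | rfl | omega

theorem matP_row (A B : List Int) (k c r : Nat) (hr : r < A.length + 1) :
    PySem.List.pyGetD (matP A B k c) ((r : Int)) []
      = List.map (fun cc => if r ≤ k ∨ (r = k + 1 ∧ cc ≤ c) then gRec A B r cc else 0)
          (List.range (B.length + 1)) := by
  rw [PySem.List.pyGetD_natCast, matP, PySem.List.getD_map_range _ _ _ _ hr]

theorem matP_get (A B : List Int) (k c r cc : Nat) (hr : r < A.length + 1)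
    (hcc : cc < B.length + 1) :
    PySem.List.pyGetD (PySem.List.pyGetD (matP A B k c) ((r : Int)) []) ((cc : Int)) 0
      = if r ≤ k ∨ (r = k + 1 ∧ cc ≤ c) then gRec A B r cc else 0 := by
  rw [matP_row A B k c r hr, PySem.List.pyGetD_natCast, PySem.List.getD_map_range _ _ _ _ hcc]

theorem matN_get (A B : List Int) (k r cc : Nat) (hr : r < A.length + 1)
    (hcc : cc < B.length + 1) :
    PySem.List.pyGetD (PySem.List.pyGetD (matN A B k) ((r : Int)) []) ((cc : Int)) 0
      = if r ≤ k then gRec A B r cc else 0 := by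
  rw [matN, PySem.List.pyGetD_natCast _ r, PySem.List.getD_map_range _ _ _ _ hr,
      PySem.List.pyGetD_natCast _ cc, PySem.List.getD_map_range _ _ _ _ hcc]

theorem innerStep (A B : List Int) (k c : Nat) (hk : k < A.length) (hc : c < B.length) :
    PySem.List.pySetD (matP A B k c) ((k : Int) + 1)
      (PySem.List.pySetD (PySem.List.pyGetD (matP A B k c) ((k : Int) + 1) []) ((c : Int) + 1)
        (if PySem.List.pyGetD A ((k : Int) + 1 - 1) 0 = PySem.List.pyGetD B ((c : Int) + 1 - 1) 0 then
           if PySem.List.pyGetD A ((k : Int) + 1 - 1) 0 > 0 then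
             PySem.List.pyGetD (PySem.List.pyGetD (matP A B k c) ((k : Int) + 1 - 1) []) ((c : Int) + 1 - 1) 0
               + PySem.List.pyGetD A ((k : Int) + 1 - 1) 0
           else
             PySem.List.pyGetD (PySem.List.pyGetD (matP A B k c) ((k : Int) + 1 - 1) []) ((c : Int) + 1 - 1) 0
         else
           max (PySem.List.pyGetD (PySem.List.pyGetD (matP A B k c) ((k : Int) + 1 - 1) []) ((c : Int) + 1) 0)
               (PySem.List.pyGetD (PySem.List.pyGetD (matP A B k c) ((k : Int) + 1) []) ((c : Int) + 1 - 1) 0)))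
    = matP A B k (c + 1) := by
  have e1 : ((k : Int) + 1 - 1) = ((k : Nat) : Int) := by ring
  have e2 : ((c : Int) + 1 - 1) = ((c : Nat) : Int) := by ring
  have e3 : ((k : Int) + 1) = (((k + 1 : Nat)) : Int) := by push_cast; ring
  have e4 : ((c : Int) + 1) = (((c + 1 : Nat)) : Int) := by push_cast; ring
  rw [e1, e2, e3, e4]
  rw [PySem.List.pyGetD_natCast A k, PySem.List.pyGetD_natCast B c]
  rw [matP_get A B k c k c (by omega) (by omega),
      matP_get A B k c k (c + 1) (by omega) (by omega),
      matP_get A B k c (k + 1) c (by omega) (by omega)]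
  rw [matP_row A B k c (k + 1) (by omega)]
  have hcond1 : (k ≤ k ∨ (k = k + 1 ∧ c ≤ c)) := Or.inl (le_refl k)
  have hcond2 : (k ≤ k ∨ (k = k + 1 ∧ c + 1 ≤ c)) := Or.inl (le_refl k)
  have hcond3 : ((k + 1 ≤ k ∨ (k + 1 = k + 1 ∧ c ≤ c))) := Or.inr ⟨rfl, le_refl c⟩
  rw [if_pos hcond1, if_pos hcond2, if_pos hcond3]
  have hv : (if A.getD k 0 = B.getD c 0 then
        if A.getD k 0 > 0 then gRec A B k c + A.getD k 0 else gRec A B k c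
      else max (gRec A B k (c + 1)) (gRec A B (k + 1) c)) = gRec A B (k + 1) (c + 1) := by
    rw [gRec_succ]
    split_ifs <;> omega
  rw [hv]
  rw [PySem.List.pySetD_natCast _ (k + 1), PySem.List.pySetD_natCast _ (c + 1)]
  rw [set_map_range]
  conv_lhs => rw [matP]
  rw [set_map_range]
  apply List.ext_getElem (by simp [matP])
  intro r h1 h2
  simp only [matP, List.getElem_map, List.getElem_range]
  by_cases hr : r = k + 1
  · subst hr
    simp only [if_true, true_and]
    apply List.ext_getElem (by simp)
    intro cc hh1 hh2
    simp only [List.getElem_map, List.getElem_range]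
    split_ifs with q1 q2 q3 <;> first | rfl | omega | (subst q1; rfl)
  · rw [if_neg hr]
    apply List.ext_getElem (by simp)
    intro cc hh1 hh2
    simp only [List.getElem_map, List.getElem_range]
    split_ifs <;> first | rfl | omega

theorem innerFold (A B : List Int) (k : Nat) (hk : k < A.length) :
    ∀ c, c ≤ B.length →
    List.foldl (fun f j =>
      let v : Int :=
        if PySem.List.pyGetD A (((k : Int) + 1) - 1) 0 = PySem.List.pyGetD B (j - 1) 0 then
          if PySem.List.pyGetD A (((k : Int) + 1) - 1) 0 > 0 then
            PySem.List.pyGetD (PySem.List.pyGetD f (((k : Int) + 1) - 1) []) (j - 1) 0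
              + PySem.List.pyGetD A (((k : Int) + 1) - 1) 0
          else
            PySem.List.pyGetD (PySem.List.pyGetD f (((k : Int) + 1) - 1) []) (j - 1) 0
        else
          max (PySem.List.pyGetD (PySem.List.pyGetD f (((k : Int) + 1) - 1) []) j 0)
              (PySem.List.pyGetD (PySem.List.pyGetD f ((k : Int) + 1) []) (j - 1) 0)
      PySem.List.pySetD f ((k : Int) + 1)
        (PySem.List.pySetD (PySem.List.pyGetD f ((k : Int) + 1) []) j v))
      (matN A B k) (PySem.List.pyRange 1 ((c : Int) + 1) 1)
    = matP A B k c := by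
  intro c
  induction c with
  | zero =>
    intro _
    rw [show ((0 : Nat) : Int) + 1 = 1 from rfl, PySem.List.pyRange_one_eq_nil (le_refl 1),
        List.foldl_nil, ← matP_zero A B k]
  | succ c ih =>
    intro hc
    have hb : (((c + 1 : Nat) : Int) + 1) = ((c : Int) + 1) + 1 := by push_cast; ring
    rw [hb, PySem.List.pyRange_one_succ_right (by omega), List.foldl_append, ih (by omega),
        List.foldl_cons, List.foldl_nil]
    exact innerStep A B k c hk (by omega)

theorem outerFold (A B : List Int) :
    ∀ t, t ≤ A.length →
    List.foldl (fun f i =>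
      List.foldl (fun f j =>
        let v : Int :=
          if PySem.List.pyGetD A (i - 1) 0 = PySem.List.pyGetD B (j - 1) 0 then
            if PySem.List.pyGetD A (i - 1) 0 > 0 then
              PySem.List.pyGetD (PySem.List.pyGetD f (i - 1) []) (j - 1) 0
                + PySem.List.pyGetD A (i - 1) 0
            else
              PySem.List.pyGetD (PySem.List.pyGetD f (i - 1) []) (j - 1) 0
          else
            max (PySem.List.pyGetD (PySem.List.pyGetD f (i - 1) []) j 0)
                (PySem.List.pyGetD (PySem.List.pyGetD f i []) (j - 1) 0)
        PySem.List.pySetD f i (PySem.List.pySetD (PySem.List.pyGetD f i []) j v))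
        f (PySem.List.pyRange 1 ((B.length : Int) + 1) 1))
      (matN A B 0) (PySem.List.pyRange 1 ((t : Int) + 1) 1)
    = matN A B t := by
  intro t
  induction t with
  | zero =>
    intro _
    rw [show ((0 : Nat) : Int) + 1 = 1 from rfl, PySem.List.pyRange_one_eq_nil (le_refl 1),
        List.foldl_nil]
  | succ t ih =>
    intro ht
    have hb : (((t + 1 : Nat) : Int) + 1) = ((t : Int) + 1) + 1 := by push_cast; ring
    rw [hb, PySem.List.pyRange_one_succ_right (a := 1) (b := (t : Int) + 1) (by omega),
        List.foldl_append, ih (by omega), List.foldl_cons, List.foldl_nil]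
    rw [← matP_last A B t]
    exact innerFold A B t (by omega) B.length (le_refl _)

theorem f0_eq (A B : List Int) :
    (PySem.List.pyRange 0 ((A.length : Int) + 1) 1).map (fun _ =>
      (PySem.List.pyRange 0 ((B.length : Int) + 1) 1).map (fun _ => (0 : Int)))
    = matN A B 0 := by
  have hA : ((A.length : Int) + 1) = ((A.length + 1 : Nat) : Int) := by push_cast; ring
  have hB : ((B.length : Int) + 1) = ((B.length + 1 : Nat) : Int) := by push_cast; ring
  rw [hA, hB, PySem.List.pyRange_zero_nat, PySem.List.pyRange_zero_nat, List.map_map,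
      List.map_map]
  apply List.ext_getElem (by simp [matN])
  intro r h1 h2
  simp only [matN, List.getElem_map, List.getElem_range, Function.comp]
  apply List.ext_getElem (by simp)
  intro cc hh1 hh2
  simp only [List.getElem_map, List.getElem_range, Function.comp]
  by_cases hr : r = 0
  · subst hr
    simp [gRec_zero_left]
  · rw [if_neg (by omega)]

theorem MSCS_eq (A B : List Int) : MSCS A B = gRec A B A.length B.length := by
  rw [show MSCS A B = PySem.List.pyGetD (PySem.List.pyGetD
      ((PySem.List.pyRange 1 ((A.length : Int) + 1) 1).foldl (fun f i =>
        (PySem.List.pyRange 1 ((B.length : Int) + 1) 1).foldl (fun f j =>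
          let v : Int :=
            if PySem.List.pyGetD A (i - 1) 0 = PySem.List.pyGetD B (j - 1) 0 then
              if PySem.List.pyGetD A (i - 1) 0 > 0 then
                PySem.List.pyGetD (PySem.List.pyGetD f (i - 1) []) (j - 1) 0 + PySem.List.pyGetD A (i - 1) 0
              else
                PySem.List.pyGetD (PySem.List.pyGetD f (i - 1) []) (j - 1) 0
            else
              max (PySem.List.pyGetD (PySem.List.pyGetD f (i - 1) []) j 0)
                  (PySem.List.pyGetD (PySem.List.pyGetD f i []) (j - 1) 0)
          PySem.List.pySetD f i (PySem.List.pySetD (PySem.List.pyGetD f i []) j v)) f)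
        ((PySem.List.pyRange 0 ((A.length : Int) + 1) 1).map (fun _ =>
          (PySem.List.pyRange 0 ((B.length : Int) + 1) 1).map (fun _ => (0 : Int)))))
      (A.length : Int) []) (B.length : Int) 0 from rfl]
  rw [f0_eq, outerFold A B A.length (le_refl _),
      matN_get A B A.length A.length B.length (by omega) (by omega), if_pos (le_refl _)]

-- ===== VERDICT (by name: the statement is the Claim_ definition above) =====
theorem MSCS_spec : Claim_equal_MSCS := by
  intro A B _
  unfold Spec_MSCS
  rw [MSCS_eq, MSCS_alt_eq]
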